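-- pv_equiv track=rewrite | github.com/PopovIV/TSPTW | src/utils.py | closest_neighbor_by_open_time
-- ===== SOURCE A (Python) =====
-- def closest_neighbor_by_open_time(openTime):
--     res = list()  # list of indexies
--     N = len(openTime)  # number of cities
--
--     res.append(0)  # add first city manually
--     for i in range(N):
--         newIndex = 0
--         smallestCost = float('inf')
--         for j in range(N):
--             if (j not in res and openTime[j] < smallestCost):
--                 newIndex = j
--                 smallestCost = openTime[j]
--         res.append(newIndex)
--
--     return res
-- ===== SOURCE B (Python) =====
-- def closest_neighbor_by_open_time(openTime):
--     N = len(openTime)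
--     if N == 0:
--         return [0]
--     order = sorted(range(1, N), key=lambda j: (openTime[j], j))
--     return [0] + order + [0]
-- ===== Notes on version B (the rewrite author's own statement) =====
-- stated objective: faster
-- what changed: Replaces A's O(N^2) greedy (N passes, each rescanning all indices for the unused one with smallest openTime) by one O(N log N) sort of the indices 1..N-1 keyed by (openTime[j], j), with index 0 prepended and appended.
import Mathlib
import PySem

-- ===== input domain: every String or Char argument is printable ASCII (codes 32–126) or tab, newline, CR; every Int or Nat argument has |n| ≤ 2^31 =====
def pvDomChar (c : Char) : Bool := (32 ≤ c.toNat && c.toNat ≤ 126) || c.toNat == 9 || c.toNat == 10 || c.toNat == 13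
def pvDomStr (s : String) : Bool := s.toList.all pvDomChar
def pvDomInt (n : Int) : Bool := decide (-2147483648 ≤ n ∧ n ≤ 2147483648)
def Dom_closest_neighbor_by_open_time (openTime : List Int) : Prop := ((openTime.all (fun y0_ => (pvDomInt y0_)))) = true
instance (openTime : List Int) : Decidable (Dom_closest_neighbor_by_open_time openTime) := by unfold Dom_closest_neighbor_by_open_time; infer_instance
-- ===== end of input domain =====

-- B replaces A's O(N^2) greedy rescan (repeatedly picking the unused index with smallest openTime)
-- by one O(N log N) sort of the nonzero indices keyed by (openTime[j], j), with index 0 prepended and appended.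

-- ===== PORT A =====
-- smallestCost starts at float('inf'); since every later value stored in it is an int and
-- 'openTime[j] < inf' is always true, it is modeled exactly as Option Int with none = inf.
def pvStepA (openTime : List Int) (res : List Int) (st : Int × Option Int) (j : Int) : Int × Option Int :=
  if (!res.contains j) && (match st.2 with
      | none => true
      | some c => decide (PySem.List.pyGetD openTime j 0 < c)) then
    (j, some (PySem.List.pyGetD openTime j 0))
  else st

def closest_neighbor_by_open_time (openTime : List Int) : List Int :=
  let N : Int := PySem.List.len openTime
  (PySem.List.pyRange 0 N 1).foldl
    (fun res _i =>
      let r := (PySem.List.pyRange 0 N 1).foldl (pvStepA openTime res) (0, none)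
      res ++ [r.1])
    [0]

-- ===== PORT B =====
def closest_neighbor_by_open_time_alt (openTime : List Int) : List Int :=
  let N : Int := PySem.List.len openTime
  if N = 0 then [0]
  else
    let order := PySem.List.sorted2 (PySem.List.pyRange 1 N 1)
      (fun j => PySem.List.pyGetD openTime j 0) (fun j => j)
    [0] ++ order ++ [0]

-- ===== PRECONDITION & SPEC =====
def Spec_closest_neighbor_by_open_time (openTime : List Int) (out : List Int) : Prop := out = closest_neighbor_by_open_time_alt openTime
instance (openTime : List Int) (out : List Int) : Decidable (Spec_closest_neighbor_by_open_time openTime out) := by unfold Spec_closest_neighbor_by_open_time; infer_instance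

-- ===== CLAIM (what is proved, stated in full; the proofs are below) =====
def Claim_equal_closest_neighbor_by_open_time : Prop := ∀ (openTime : List Int), Dom_closest_neighbor_by_open_time openTime → Spec_closest_neighbor_by_open_time openTime (closest_neighbor_by_open_time openTime)

-- ===== LEMMAS AND PROOFS =====

-- strict lexicographic order on indices keyed by (v j, j); the order B sorts by
def pvLt (v : Int → Int) (a b : Int) : Prop := v a < v b ∨ (v a = v b ∧ a < b)

-- A's inner-loop body once the membership test has been factored out
def pvStep2 (v : Int → Int) (st : Int × Option Int) (j : Int) : Int × Option Int :=
  if (match st.2 with | none => true | some c => decide (v j < c)) then (j, some (v j)) else st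

lemma pvStepA_eq (openTime res : List Int) (st : Int × Option Int) (j : Int) :
    pvStepA openTime res st j =
      if res.contains j then st else pvStep2 (fun j => PySem.List.pyGetD openTime j 0) st j := by
  unfold pvStepA pvStep2
  cases res.contains j <;> simp

lemma pv_foldl_skip {α β : Type} (p : β → Bool) (f : α → β → α) :
    ∀ (js : List β) (st : α),
      js.foldl (fun st j => if p j then st else f st j) st =
        (js.filter (fun j => !p j)).foldl f st := by
  intro js
  induction js with
  | nil => intro st; rfl
  | cons a t ih =>
    intro st
    by_cases h : p a <;> simp [h, ih]

lemma pv_sorted2_eq_sorted_toLex (xs : List Int) (k1 : Int → Int) :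
    PySem.List.sorted2 xs k1 (fun j => j) =
      PySem.List.sorted xs (fun j => toLex (k1 j, j)) := by
  have hb : (fun (a b : Int) => decide (k1 a < k1 b) || (!decide (k1 b < k1 a) && decide (a < b)))
      = (fun (a b : Int) => decide (toLex (k1 a, a) < toLex (k1 b, b))) := by
    funext a b
    simp only [Prod.Lex.toLex_lt_toLex]
    rcases lt_trichotomy (k1 a) (k1 b) with h | h | h
    · simp [h]
    · simp [h]
    · simp [h.ne']
      exact fun h' => absurd h' (not_le.mpr h)
  simp only [PySem.List.sorted2, PySem.List.sorted, hb]
  simp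

lemma pv_sorted2_pairwise (xs : List Int) (v : Int → Int) (hnd : xs.Nodup) :
    (PySem.List.sorted2 xs v (fun j => j)).Pairwise (pvLt v) := by
  rw [pv_sorted2_eq_sorted_toLex]
  have h1 := PySem.List.sorted_pairwise xs (fun j => toLex (v j, j)) (κ := Int ×ₗ Int)
  have h2 : (PySem.List.sorted xs (fun j => toLex (v j, j))).Nodup :=
    (PySem.List.sorted_perm xs (fun j => toLex (v j, j)) false).nodup_iff.mpr hnd
  refine (h1.and h2).imp ?_
  rintro a b ⟨hle, hne⟩
  rcases (Prod.Lex.toLex_le_toLex).mp hle with h | ⟨h1', h2'⟩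
  · exact Or.inl h
  · exact Or.inr ⟨h1', lt_of_le_of_ne h2' hne⟩

lemma pv_foldl_step2_min (v : Int → Int) :
    ∀ (cs : List Int) (x m : Int), cs.Pairwise (· < ·) → (∀ j ∈ cs, x < j) →
      m ∈ x :: cs → (∀ j ∈ x :: cs, j ≠ m → pvLt v m j) →
      cs.foldl (pvStep2 v) (x, some (v x)) = (m, some (v m)) := by
  intro cs
  induction cs with
  | nil =>
    intro x m _ _ hm _
    simp only [List.mem_singleton] at hm
    subst hm; rfl
  | cons c t ih =>
    intro x m hpw hlt hm hmin
    have hxc : x < c := hlt c (by simp)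
    have hstep : pvStep2 v (x, some (v x)) c =
        if v c < v x then (c, some (v c)) else (x, some (v x)) := by
      simp [pvStep2]
    rw [List.foldl_cons, hstep]
    by_cases h : v c < v x
    · rw [if_pos h]
      have hmx : m ≠ x := by
        rintro rfl
        rcases hmin c (by simp) (by omega) with h' | ⟨h1, h2⟩ <;> omega
      apply ih c m hpw.of_cons (fun j hj => List.rel_of_pairwise_cons hpw hj)
      · rcases List.mem_cons.mp hm with rfl | hm'
        · exact absurd rfl hmx
        · exact hm'
      · intro j hj hjm
        exact hmin j (List.mem_cons_of_mem x hj) hjm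
    · rw [if_neg h]
      have hmc : m ≠ c := by
        rintro rfl
        rcases hmin x (by simp) (by omega) with h' | ⟨h1, h2⟩ <;> omega
      apply ih x m hpw.of_cons
      · intro j hj; exact hlt j (List.mem_cons_of_mem c hj)
      · rcases List.mem_cons.mp hm with rfl | hm'
        · simp
        · rcases List.mem_cons.mp hm' with rfl | hm''
          · exact absurd rfl hmc
          · exact List.mem_cons_of_mem x hm''
      · intro j hj hjm
        rcases List.mem_cons.mp hj with rfl | hj'
        · exact hmin j (by simp) hjm
        · exact hmin j (by simp [hj']) hjm

lemma pv_foldl_step2_min' (v : Int → Int) (cs : List Int) (m : Int)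
    (hpw : cs.Pairwise (· < ·)) (hm : m ∈ cs) (hmin : ∀ j ∈ cs, j ≠ m → pvLt v m j) :
    cs.foldl (pvStep2 v) (0, none) = (m, some (v m)) := by
  cases cs with
  | nil => simp at hm
  | cons c t =>
    have h0 : pvStep2 v (0, none) c = (c, some (v c)) := by simp [pvStep2]
    rw [List.foldl_cons, h0]
    exact pv_foldl_step2_min v t c m hpw.of_cons (fun j hj => List.rel_of_pairwise_cons hpw hj) hm hmin

lemma pv_main (openTime : List Int) :
    closest_neighbor_by_open_time openTime = closest_neighbor_by_open_time_alt openTime := by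
  rcases Nat.eq_zero_or_pos openTime.length with hN | hN
  · rcases List.length_eq_zero_iff.mp hN with rfl
    rfl
  · set n := openTime.length with hn
    set N : Int := (n : Int) with hNdef
    set v : Int → Int := fun j => PySem.List.pyGetD openTime j 0 with hv
    set S := PySem.List.sorted2 (PySem.List.pyRange 1 N 1) v (fun j => j) with hS
    have hrange_nd : (PySem.List.pyRange 1 N 1).Nodup := PySem.List.nodup_pyRange_one 1 N
    have hSperm : S.Perm (PySem.List.pyRange 1 N 1) := PySem.List.sorted2_perm _ _ _ _
    have hmemS : ∀ j, j ∈ S ↔ 1 ≤ j ∧ j < N := by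
      intro j; rw [hSperm.mem_iff, PySem.List.mem_pyRange_one]
    have hndS : S.Nodup := hSperm.nodup_iff.mpr hrange_nd
    have hpwS : S.Pairwise (pvLt v) := pv_sorted2_pairwise _ _ hrange_nd
    have hlenS : S.length = n - 1 := by
      rw [hSperm.length_eq, PySem.List.length_pyRange_one]; omega
    -- inner loop = fold of pvStep2 over the filtered range
    have hinner : ∀ res : List Int,
        (PySem.List.pyRange 0 N 1).foldl (pvStepA openTime res) (0, none) =
          ((PySem.List.pyRange 0 N 1).filter (fun j => !res.contains j)).foldl (pvStep2 v) (0, none) := by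
      intro res
      have hfn : pvStepA openTime res = fun st j => if res.contains j then st else pvStep2 v st j := by
        funext st j; exact pvStepA_eq openTime res st j
      rw [hfn, pv_foldl_skip]
    -- outer loop invariant
    have houter : ∀ (L : List Int) (k : Nat), k ≤ S.length → L.length + k = S.length + 1 →
        L.foldl (fun res _i =>
          let r := (PySem.List.pyRange 0 N 1).foldl (pvStepA openTime res) (0, none)
          res ++ [r.1]) (0 :: S.take k) = 0 :: (S ++ [0]) := by
      intro L
      induction L with
      | nil => intro k hk hlen; simp at hlen; omega
      | cons a L' ih =>
        intro k hk hlen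
        rw [List.foldl_cons]
        have hsplit : S.Nodup → List.Disjoint (S.take k) (S.drop k) := by
          intro h; rw [← List.take_append_drop k S] at h
          exact List.disjoint_of_nodup_append h
        have hdisj := hsplit hndS
        have hcs : ∀ j, (j ∈ (PySem.List.pyRange 0 N 1).filter
            (fun j => !(((0 : Int) :: S.take k).contains j))) ↔ j ∈ S.drop k := by
          intro j
          simp only [List.mem_filter, PySem.List.mem_pyRange_one, Bool.not_eq_eq_eq_not,
            Bool.not_true, List.contains_eq_mem, List.mem_cons, decide_eq_false_iff_not, not_or]
          constructor
          · rintro ⟨⟨h0, hN'⟩, hne0, hnt⟩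
            have hjS : j ∈ S := (hmemS j).mpr ⟨by omega, hN'⟩
            rw [← List.take_append_drop k S, List.mem_append] at hjS
            rcases hjS with h | h
            · exact absurd h hnt
            · exact h
          · intro hdrop
            have hjS : j ∈ S := by
              rw [← List.take_append_drop k S]; exact List.mem_append_right _ hdrop
            have := (hmemS j).mp hjS
            refine ⟨⟨by omega, this.2⟩, by omega, fun ht => hdisj ht hdrop⟩
        have hpwcs : ((PySem.List.pyRange 0 N 1).filter
            (fun j => !(((0 : Int) :: S.take k).contains j))).Pairwise (· < ·) :=
          (PySem.List.pairwise_lt_pyRange_one 0 N).filter _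
        rcases Nat.lt_or_ge k S.length with hk' | hk'
        · -- pick S[k]
          have hdropeq : S.drop k = S[k] :: S.drop (k+1) := List.drop_eq_getElem_cons hk'
          have hmem : S[k] ∈ S.drop k := by rw [hdropeq]; exact List.mem_cons_self
          have hmin : ∀ j ∈ S.drop k, j ≠ S[k] → pvLt v S[k] j := by
            intro j hj hjne
            have hpwd : (S.drop k).Pairwise (pvLt v) := hpwS.drop
            rw [hdropeq] at hpwd hj
            rcases List.mem_cons.mp hj with rfl | hj'
            · exact absurd rfl hjne
            · exact List.rel_of_pairwise_cons hpwd hj'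
          have hfold := pv_foldl_step2_min' v _ S[k] hpwcs (by rw [hcs]; exact hmem)
            (fun j hj hjne => hmin j ((hcs j).mp hj) hjne)
          show List.foldl _ ((0 :: S.take k) ++ [_]) L' = _
          rw [hinner, hfold]
          have htake : (0 : Int) :: S.take k ++ [S[k]] = 0 :: S.take (k+1) := by
            rw [List.take_add_one]
            simp [List.getElem?_eq_getElem hk']
          rw [htake]
          have hlen' : L'.length + (k+1) = S.length + 1 := by simp at hlen; omega
          exact ih (k+1) (by omega) hlen'
        · -- k = S.length : every index is already in res
          have hkeq : k = S.length := le_antisymm hk hk'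
          have hlen' : L'.length = 0 := by simp at hlen; omega
          have hL' : L' = [] := List.length_eq_zero_iff.mp hlen'
          have hcse : ((PySem.List.pyRange 0 N 1).filter
              (fun j => !(((0 : Int) :: S.take k).contains j))) = [] := by
            rcases h : ((PySem.List.pyRange 0 N 1).filter
              (fun j => !(((0 : Int) :: S.take k).contains j))) with _ | ⟨c, t⟩
            · rfl
            · exfalso
              have hc : c ∈ S.drop k := (hcs c).mp (by rw [h]; exact List.mem_cons_self)
              rw [hkeq, List.drop_length] at hc
              simp at hc
          rw [hinner, hcse, hL']
          simp only [List.foldl_nil]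
          rw [hkeq, List.take_length]
          rfl
  -- now assemble
    show (PySem.List.pyRange 0 (PySem.List.len openTime) 1).foldl _ [0] = _
    have hlen0 : PySem.List.len openTime = N := by simp [PySem.List.len_eq, hNdef, hn]
    rw [hlen0]
    have hA := houter (PySem.List.pyRange 0 N 1) 0 (Nat.zero_le _)
      (by rw [PySem.List.length_pyRange_one]; omega)
    simp only [List.take_zero] at hA
    rw [hA]
    show _ = closest_neighbor_by_open_time_alt openTime
    unfold closest_neighbor_by_open_time_alt
    rw [hlen0]
    rw [if_neg (by omega)]
    simp [hS, hv]

-- ===== VERDICT (by name: the statement is the Claim_ definition above) =====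
theorem closest_neighbor_by_open_time_spec : Claim_equal_closest_neighbor_by_open_time := by
  intro openTime _hdom
  unfold Spec_closest_neighbor_by_open_time
  exact pv_main openTime
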